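-- pv_equiv track=rewrite | github.com/SAMischikhin/check_detonation | utils.py | get_rooms
-- ===== SOURCE A (Python) =====
-- def get_key(d, search_value): #[{key: list_value}] -> key if search value in list_value
--     for key, list_value in d.items():
--         if str(search_value) in list_value:
--             return key
--     return None
--
-- def get_rooms(rooms_dict, box_list):
--     res_dict = {}
--     for box in box_list:
--         key = get_key(rooms_dict, box)
--         if key not in res_dict.keys():
--             res_dict[key] = []
--         res_dict[key].append(box)
--
--     return (res_dict)
-- ===== SOURCE B (Python) =====
-- def get_rooms(rooms_dict, box_list):
--     # Inverted index: value -> first room key containing it (built once).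
--     index = {}
--     for key, values in rooms_dict.items():
--         for v in values:
--             if v not in index:
--                 index[v] = key
--     res = {}
--     for box in box_list:
--         key = index.get(box)
--         res[key] = res.get(key, []) + [box]
--     return res
-- ===== Notes on version B (the rewrite author's own statement) =====
-- stated objective: faster
-- what changed: B builds an inverted index value->first-room-key once and then does a single grouping pass, instead of A's per-box linear scan over every room's list.
import Mathlib
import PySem

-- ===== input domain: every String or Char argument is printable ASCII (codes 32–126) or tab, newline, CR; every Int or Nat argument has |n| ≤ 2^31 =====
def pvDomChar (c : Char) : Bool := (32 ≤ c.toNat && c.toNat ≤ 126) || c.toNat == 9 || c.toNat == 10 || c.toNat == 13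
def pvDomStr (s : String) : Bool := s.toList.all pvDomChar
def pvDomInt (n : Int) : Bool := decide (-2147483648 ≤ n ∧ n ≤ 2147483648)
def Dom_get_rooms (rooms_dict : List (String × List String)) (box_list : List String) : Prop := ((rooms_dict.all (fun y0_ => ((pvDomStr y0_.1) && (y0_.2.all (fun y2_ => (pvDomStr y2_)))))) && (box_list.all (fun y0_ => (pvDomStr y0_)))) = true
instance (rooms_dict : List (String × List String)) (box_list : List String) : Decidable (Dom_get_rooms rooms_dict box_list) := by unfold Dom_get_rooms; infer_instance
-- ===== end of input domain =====

-- B replaces A's per-box scan of all room lists by an inverted index built once (objective: faster, asymptotic).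

-- ===== PORT A =====
-- get_key(d, search_value): first key whose list contains the value (str(box) = box for strings)
def get_key (d : List (String × List String)) (search_value : String) : Option String :=
  match d with
  | [] => none
  | (key, list_value) :: rest =>
      if search_value ∈ list_value then some key else get_key rest search_value

def get_rooms (rooms_dict : List (String × List String)) (box_list : List String) : List (Option String × List String) :=
  (box_list.foldl (fun res_dict box =>
      let key := get_key rooms_dict box
      let res_dict := if res_dict.contains key then res_dict else res_dict.insert key []
      res_dict.modify key [] (fun l => l ++ [box]))
    (PySem.Dict.empty : PySem.Dict (Option String) (List String))).items

-- ===== PORT B =====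
-- inverted index: value -> first room key containing it
def build_index (rooms_dict : List (String × List String)) : PySem.Dict String String :=
  rooms_dict.foldl (fun ix p =>
      p.2.foldl (fun ix v => if ix.contains v then ix else ix.insert v p.1) ix)
    PySem.Dict.empty

def get_rooms_alt (rooms_dict : List (String × List String)) (box_list : List String) : List (Option String × List String) :=
  let index := build_index rooms_dict
  (box_list.foldl (fun res box =>
      let key := index.get? box
      res.insert key (res.getD key [] ++ [box]))
    (PySem.Dict.empty : PySem.Dict (Option String) (List String))).items

-- ===== PRECONDITION & SPEC =====
def Spec_get_rooms (rooms_dict : List (String × List String)) (box_list : List String) (out : List (Option String × List String)) : Prop := out = get_rooms_alt rooms_dict box_list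
instance (rooms_dict : List (String × List String)) (box_list : List String) (out : List (Option String × List String)) : Decidable (Spec_get_rooms rooms_dict box_list out) := by unfold Spec_get_rooms; infer_instance

-- ===== CLAIM (what is proved, stated in full; the proofs are below) =====
def Claim_equal_get_rooms : Prop := ∀ (rooms_dict : List (String × List String)) (box_list : List String), Dom_get_rooms rooms_dict box_list → Spec_get_rooms rooms_dict box_list (get_rooms rooms_dict box_list)

-- ===== LEMMAS AND PROOFS =====

-- lookup in the inner (one room) fold: keeps old bindings, else binds values of the list
theorem index_inner_get? (lv : List String) (k : String) (ix : PySem.Dict String String) (b : String) :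
    (lv.foldl (fun ix v => if ix.contains v then ix else ix.insert v k) ix).get? b
      = if (ix.get? b).isSome then ix.get? b else if b ∈ lv then some k else none := by
  induction lv generalizing ix with
  | nil => cases h : ix.get? b <;> simp [h]
  | cons v rest ih =>
      simp only [List.foldl_cons, ih]
      by_cases hc : ix.contains v = true
      · simp only [hc, if_true]
        cases h : ix.get? b with
        | some w => simp
        | none =>
            rcases eq_or_ne b v with rfl | hne
            · rw [PySem.Dict.contains_eq_isSome_get?, h] at hc
              simp at hc
            · simp [hne]
      · have h0 : ix.contains v = false := by simpa using hc
        simp only [hc, Bool.false_eq_true, if_false, PySem.Dict.get?_insert]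
        rcases eq_or_ne b v with rfl | hne
        · have h : ix.get? b = none := by
            rw [PySem.Dict.contains_eq_isSome_get?] at h0
            exact Option.not_isSome_iff_eq_none.mp (by simp [h0])
          simp [h]
        · simp [hne]

-- lookup in the full index fold = get_key (when not already bound)
theorem index_get? (rooms : List (String × List String)) (ix : PySem.Dict String String) (b : String) :
    (rooms.foldl (fun ix p => p.2.foldl (fun ix v => if ix.contains v then ix else ix.insert v p.1) ix) ix).get? b
      = if (ix.get? b).isSome then ix.get? b else get_key rooms b := by
  induction rooms generalizing ix with
  | nil => cases h : ix.get? b <;> simp [get_key, h]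
  | cons p rest ih =>
      simp only [List.foldl_cons, ih, index_inner_get?]
      cases h : ix.get? b with
      | some v => simp
      | none =>
          simp only [Option.isSome_none, Bool.false_eq_true, if_false, get_key]
          by_cases hm : b ∈ p.2 <;> simp [hm]

theorem build_index_get? (rooms : List (String × List String)) (b : String) :
    (build_index rooms).get? b = get_key rooms b := by
  simp [build_index, index_get?]

-- modify is insert of the modified default lookup (definitional)
theorem modify_eq_insert (d : PySem.Dict (Option String) (List String)) (k : Option String)
    (dflt : List String) (f : List String → List String) :
    d.modify k dflt f = d.insert k (f (d.getD k dflt)) := rfl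

-- one grouping step of A equals one grouping step of B
theorem step_eq (d : PySem.Dict (Option String) (List String)) (k : Option String) (box : String) :
    (let d' := if d.contains k then d else d.insert k []
     d'.modify k [] (fun l => l ++ [box])) = d.insert k (d.getD k [] ++ [box]) := by
  by_cases hc : d.contains k = true
  · simp only [hc, if_true, modify_eq_insert]
  · simp only [hc, Bool.false_eq_true, if_false, modify_eq_insert,
      PySem.Dict.getD_insert_self, PySem.Dict.insert_insert_self, List.nil_append]
    have h0 : d.contains k = false := by simpa using hc
    rw [PySem.Dict.getD_of_not_contains d [] h0, List.nil_append]

-- ===== VERDICT (by name: the statement is the Claim_ definition above) =====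
theorem get_rooms_spec : Claim_equal_get_rooms := by
  intro rooms_dict box_list _
  unfold Spec_get_rooms get_rooms get_rooms_alt
  rw [PySem.List.foldl_congr_mem]
  intro acc x _
  simp only [build_index_get?]
  exact step_eq acc (get_key rooms_dict x) x
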